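-- pv_equiv track=rewrite | github.com/kamleshiitbhu/practice | HLD/practive.py | find_inv2
-- ===== SOURCE A (Python) =====
-- def find_inv2(l):
--     sorted_unique_values = sorted(set(l))
--     # BIT index starts from 1
--     v2treeid = {v: i + 1 for i, v in enumerate(sorted_unique_values)}
--     def update(v):
--         treeid = v2treeid[v]
--         while treeid < len(bit):
--             # number of unique values
--             bit[treeid] += 1
--             treeid += treeid & -treeid
--
--     def query(v):
--         treeid = v2treeid[v]
--         ans = 0
--         while treeid > 0:
--             # number of unique values
--             ans += bit[treeid]
--             treeid -= treeid & -treeid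
--         return ans
--
--     # unique smaller values on the right
--     smaller_right = [0] * len(l)
--     bit = [0] * (len(sorted_unique_values) + 1)
--     visited = set()
--     for i in reversed(range(len(l))):
--         v = l[i]
--         if v not in visited:
--             update(v)
--         visited.add(v)
--
--         if v != sorted_unique_values[0]:
--             # smallest value has count = 0
--             # query the nearest value smaller than v
--             smaller_right[i] = query(sorted_unique_values[v2treeid[v] - 1 - 1])
--
--     # unique larger values on the left
--     larger_left = [0] * len(l)
--     bit = [0] * (len(sorted_unique_values) + 1)
--     visited = set()
--     for i, n in enumerate(l):
--         v = l[i]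
--         if v not in visited:
--             update(v)
--         visited.add(v)
--
--         if v != sorted_unique_values[-1]:
--             # largest value has count = 0
--             larger_left[i] = query(sorted_unique_values[-1]) - query(sorted_unique_values[v2treeid[v] - 1])
--
--     # unique triplet
--     visited2largeleft = {}
--     cnt = 0
--     for i, (v, n_large, n_small) in enumerate(zip(l, larger_left, smaller_right)):
--         if v in visited2largeleft:
--             # compared with the last occurrence, the new encountered larger value on the left
--             # paired with the smaller values on the right make up of new triplets
--             cnt += (n_large - visited2largeleft[v]) * n_small
--         else:
--             cnt += n_large * n_small
--         visited2largeleft[v] = n_large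
--
--     return cnt
-- ===== SOURCE B (Python) =====
-- def find_inv2(l):
--     # direct distinct counts instead of the two Fenwick-tree passes
--     n = len(l)
--     larger_left = [len({x for x in l[:i] if x > l[i]}) for i in range(n)]
--     smaller_right = [len({x for x in l[i + 1:] if x < l[i]}) for i in range(n)]
--     visited2largeleft = {}
--     cnt = 0
--     for v, n_large, n_small in zip(l, larger_left, smaller_right):
--         if v in visited2largeleft:
--             cnt += (n_large - visited2largeleft[v]) * n_small
--         else:
--             cnt += n_large * n_small
--         visited2largeleft[v] = n_large
--     return cnt
-- ===== Notes on version B (the rewrite author's own statement) =====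
-- stated objective: simpler
-- what changed: Replaced the two Fenwick-tree (binary indexed tree) passes, the sorted-unique rank index and the update/query helpers by direct per-index set comprehensions counting distinct larger values on the left and distinct smaller values on the right; the final triplet-aggregation loop is kept unchanged.
import Mathlib
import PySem

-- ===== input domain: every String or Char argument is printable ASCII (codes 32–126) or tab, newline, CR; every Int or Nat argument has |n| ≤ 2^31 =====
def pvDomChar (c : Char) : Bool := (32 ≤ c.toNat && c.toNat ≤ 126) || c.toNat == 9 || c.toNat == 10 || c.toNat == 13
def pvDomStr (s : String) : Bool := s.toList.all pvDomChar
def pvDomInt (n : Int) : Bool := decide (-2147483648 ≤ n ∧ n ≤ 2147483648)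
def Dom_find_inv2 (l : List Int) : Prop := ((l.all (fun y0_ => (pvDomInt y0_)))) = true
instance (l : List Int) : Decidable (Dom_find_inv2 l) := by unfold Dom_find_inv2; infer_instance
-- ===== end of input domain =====

-- B replaces A's two Fenwick-tree (BIT) passes by direct distinct-value counts (simpler, not faster);
-- the final triplet-aggregation loop is unchanged.  Return values agree on all inputs.

-- ===== PORT A =====
-- treeid & -treeid
def pvLow (t : Int) : Int := PySem.Int.band t (-t)

-- sorted_unique_values = sorted(set(l))
def pvSuv (l : List Int) : List Int := PySem.List.sorted (PySem.Set.ofList l) (fun x => x) false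

-- v2treeid = {v: i + 1 for i, v in enumerate(sorted_unique_values)}
def pvV2 (l : List Int) : PySem.Dict Int Int :=
  (PySem.List.enumerate (pvSuv l) 0).foldl (fun d p => d.insert p.2 (p.1 + 1)) PySem.Dict.empty

-- the 'while treeid < len(bit)' loop of update(); fuel = len(bit) at the call site is sufficient:
-- treeid starts at v2treeid[v] ≥ 1 and strictly increases each iteration.
def pvUpdLoop (fuel : Nat) (bit : List Int) (t : Int) : List Int :=
  match fuel with
  | 0 => bit
  | f + 1 =>
      if t < PySem.List.len bit then
        pvUpdLoop f (PySem.List.pySetD bit t (PySem.List.pyGetD bit t 0 + 1)) (t + pvLow t)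
      else bit

-- the 'while treeid > 0' loop of query(); fuel = treeid.toNat is sufficient: treeid strictly decreases.
def pvQryLoop (fuel : Nat) (bit : List Int) (t : Int) (ans : Int) : Int :=
  match fuel with
  | 0 => ans
  | f + 1 =>
      if 0 < t then pvQryLoop f bit (t - pvLow t) (ans + PySem.List.pyGetD bit t 0) else ans

-- update(v): treeid = v2treeid[v]; v is always a key of v2treeid, so the KeyError default 0 is never used
def pvUpdate (v2 : PySem.Dict Int Int) (bit : List Int) (v : Int) : List Int :=
  pvUpdLoop bit.length bit (v2.getD v 0)

-- query(v)
def pvQuery (v2 : PySem.Dict Int Int) (bit : List Int) (v : Int) : Int :=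
  pvQryLoop (v2.getD v 0).toNat bit (v2.getD v 0) 0

-- body of the smaller_right loop, state (bit, visited, smaller_right)
def pvSmallStep (l : List Int) (s : List Int × PySem.Set Int × List Int) (i : Int) :
    List Int × PySem.Set Int × List Int :=
  let v := PySem.List.pyGetD l i 0                    -- l[i], i ∈ range(len(l)): in range
  let bit := if !(PySem.Set.contains s.2.1 v) then pvUpdate (pvV2 l) s.1 v else s.1
  let visited := PySem.Set.add s.2.1 v
  let sr := if v ≠ PySem.List.pyGetD (pvSuv l) 0 0 then    -- suv nonempty inside the loop
      PySem.List.pySetD s.2.2 i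
        (pvQuery (pvV2 l) bit
          (PySem.List.pyGetD (pvSuv l) ((pvV2 l).getD v 0 - 1 - 1) 0))
    else s.2.2
  (bit, visited, sr)

-- body of the larger_left loop, state (bit, visited, larger_left); p comes from enumerate(l)
def pvLargeStep (l : List Int) (s : List Int × PySem.Set Int × List Int) (p : Int × Int) :
    List Int × PySem.Set Int × List Int :=
  let v := PySem.List.pyGetD l p.1 0                  -- l[i]
  let bit := if !(PySem.Set.contains s.2.1 v) then pvUpdate (pvV2 l) s.1 v else s.1
  let visited := PySem.Set.add s.2.1 v
  let ll := if v ≠ PySem.List.pyGetD (pvSuv l) (-1) 0 then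
      PySem.List.pySetD s.2.2 p.1
        (pvQuery (pvV2 l) bit (PySem.List.pyGetD (pvSuv l) (-1) 0) -
         pvQuery (pvV2 l) bit (PySem.List.pyGetD (pvSuv l) ((pvV2 l).getD v 0 - 1) 0))
    else s.2.2
  (bit, visited, ll)

-- body of the unique-triplet aggregation loop (this loop is IDENTICAL in A and in B, so the
-- step function is shared verbatim by both ports); state (visited2largeleft, cnt)
def pvAggStep (s : PySem.Dict Int Int × Int) (p : Int × Int × Int) : PySem.Dict Int Int × Int :=
  let cnt := if s.1.contains p.1 then s.2 + (p.2.1 - s.1.getD p.1 0) * p.2.2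
             else s.2 + p.2.1 * p.2.2
  (s.1.insert p.1 p.2.1, cnt)

def find_inv2 (l : List Int) : Int :=
  -- smaller_right pass: for i in reversed(range(len(l)))
  let smaller_right :=
    (((PySem.List.pyRange 0 (PySem.List.len l) 1).reverse).foldl (pvSmallStep l)
      (List.replicate ((pvSuv l).length + 1) 0, PySem.Set.empty, List.replicate l.length 0)).2.2
  -- larger_left pass: for i, n in enumerate(l)
  let larger_left :=
    ((PySem.List.enumerate l 0).foldl (pvLargeStep l)
      (List.replicate ((pvSuv l).length + 1) 0, PySem.Set.empty, List.replicate l.length 0)).2.2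
  -- unique-triplet aggregation over zip(l, larger_left, smaller_right)
  ((l.zip (larger_left.zip smaller_right)).foldl pvAggStep (PySem.Dict.empty, 0)).2

-- ===== PORT B =====
def find_inv2_alt (l : List Int) : Int :=
  let n := l.length
  -- larger_left[i] = len({x for x in l[:i] if x > l[i]}); l[:i] = take i, l[i] = getD (in range)
  let larger_left : List Int := (List.range n).map
    (fun i => ((PySem.Set.ofList ((l.take i).filter (fun x => decide (l.getD i 0 < x)))).length : Int))
  -- smaller_right[i] = len({x for x in l[i+1:] if x < l[i]}); l[i+1:] = drop (i+1)
  let smaller_right : List Int := (List.range n).map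
    (fun i => ((PySem.Set.ofList ((l.drop (i + 1)).filter (fun x => decide (x < l.getD i 0)))).length : Int))
  -- the unchanged aggregation loop (same loop as in A, shared step function pvAggStep)
  ((l.zip (larger_left.zip smaller_right)).foldl pvAggStep (PySem.Dict.empty, 0)).2

-- ===== PRECONDITION & SPEC =====
def Spec_find_inv2 (l : List Int) (out : Int) : Prop := out = find_inv2_alt l
instance (l : List Int) (out : Int) : Decidable (Spec_find_inv2 l out) := by unfold Spec_find_inv2; infer_instance

-- ===== CLAIM (what is proved, stated in full; the proofs are below) =====
def Claim_equal_find_inv2 : Prop := ∀ (l : List Int), Dom_find_inv2 l → Spec_find_inv2 l (find_inv2 l)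


-- ===== LEMMAS AND PROOFS =====

-- ---- lowest-set-bit arithmetic ----

theorem pvLand1 (j : ℕ) : (2*j+1) &&& (2*j) = 2*j := by
  apply Nat.eq_of_testBit_eq
  intro i
  rw [Nat.testBit_and]
  cases i with
  | zero => simp [Nat.testBit_zero]
  | succ i =>
      simp only [Nat.testBit_succ]
      have e1 : (2*j+1)/2 = j := by omega
      have e2 : (2*j)/2 = j := by omega
      rw [e1, e2, Bool.and_self]

theorem pvLand2 (j : ℕ) (h : 0 < j) : (2*j) &&& (2*j-1) = 2*(j &&& (j-1)) := by
  have h1 : 2*j-1 = 2*(j-1)+1 := by omega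
  apply Nat.eq_of_testBit_eq
  intro i
  rw [h1, Nat.testBit_and]
  cases i with
  | zero => simp [Nat.testBit_zero]
  | succ i =>
      simp only [Nat.testBit_succ]
      have e1 : (2*(j-1)+1)/2 = j-1 := by omega
      have e2 : (2*j)/2 = j := by omega
      have e3 : (2*(j &&& (j-1)))/2 = j &&& (j-1) := by omega
      rw [e1, e2, e3, Nat.testBit_and]

-- k & -k on ℕ: lowN k = 2 ^ (number of trailing zero bits of k)
def lowN (k : ℕ) : ℕ := k - (k &&& (k-1))

theorem lowN_spec (k : ℕ) (hk : 0 < k) : ∃ a m, k = 2^a * (2*m+1) ∧ lowN k = 2^a := by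
  induction k using Nat.strong_induction_on with
  | _ k ih =>
    rcases Nat.even_or_odd k with he | ho
    · obtain ⟨j, hj⟩ := he
      have hj2 : k = 2*j := by omega
      have hjpos : 0 < j := by omega
      obtain ⟨a, m, h1, h2⟩ := ih j (by omega) hjpos
      refine ⟨a+1, m, by rw [hj2, h1]; ring, ?_⟩
      have hle : j &&& (j-1) ≤ j := Nat.and_le_left
      unfold lowN at h2 ⊢
      rw [hj2, pvLand2 j hjpos]
      omega
    · obtain ⟨j, hj⟩ := ho
      refine ⟨0, j, by omega, ?_⟩
      unfold lowN
      rw [hj]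
      simp only [Nat.add_sub_cancel]
      rw [pvLand1]
      omega

theorem lowN_pos (k : ℕ) (hk : 0 < k) : 0 < lowN k := by
  obtain ⟨a, m, _, h2⟩ := lowN_spec k hk; rw [h2]; positivity

theorem lowN_le (k : ℕ) : lowN k ≤ k := Nat.sub_le _ _

theorem pvLow_natCast' (k : ℕ) (hk : 0 < k) : PySem.Int.band (k : Int) (-(k : Int)) = (lowN k : Int) := by
  simp only [PySem.Int.band]
  have h1 : (0:Int) ≤ (k:Int) := by positivity
  have h2 : ¬ (0:Int) ≤ -(k:Int) := by omega
  rw [if_pos h1, if_neg h2]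
  have h3 : (-(-(k:Int)) - 1).toNat = k - 1 := by omega
  have h4 : ((k:Int)).toNat = k := by omega
  rw [h3, h4]
  rfl

-- an index j is on the update chain of k  ⟺  k lies in j's Fenwick interval (j - lowbit j, j]
theorem chain_step (k j : ℕ) (hk : 0 < k) (hj : j ≠ k) :
    ((k + lowN k ≤ j ∧ j - lowN j < k + lowN k) ↔ (k ≤ j ∧ j - lowN j < k)) := by
  rcases Nat.eq_zero_or_pos j with rfl | hjpos
  · have := lowN_pos k hk
    constructor <;> (rintro ⟨h1, h2⟩; omega)
  obtain ⟨a, u, hju, hja⟩ := lowN_spec j hjpos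
  obtain ⟨b, s, hks, hkb⟩ := lowN_spec k hk
  rw [hja, hkb]
  have hb0 : 0 < 2^b := Nat.pow_pos (by omega)
  have ha0 : 0 < 2^a := Nat.pow_pos (by omega)
  have hj2a : j - 2^a = 2^(a+1) * u := by
    have h1 : 2^a*(2*u+1) = 2^(a+1)*u + 2^a := by ring
    omega
  constructor
  · rintro ⟨h1, h2⟩
    refine ⟨by omega, ?_⟩
    by_contra hcon
    simp only [not_lt] at hcon
    rcases le_or_gt b a with hba | hab
    · have d1 : 2^b ∣ j - 2^a := by
        rw [hj2a]; exact dvd_mul_of_dvd_left (pow_dvd_pow 2 (by omega)) u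
      have d2 : 2^b ∣ k := hks ▸ dvd_mul_right _ _
      have d3 : 2^b ∣ (j - 2^a) - k := Nat.dvd_sub d1 d2
      have heq : j - 2^a = k := by
        rcases Nat.eq_zero_or_pos ((j - 2^a) - k) with h0 | hp
        · omega
        · have := Nat.le_of_dvd hp d3; omega
      have d4 : 2^(b+1) ∣ k := by
        have t1 : (2:ℕ)^(b+1) ∣ 2^(a+1) := pow_dvd_pow 2 (by omega)
        have t2 : (2:ℕ)^(a+1) ∣ k := by rw [← heq, hj2a]; exact dvd_mul_right _ u
        exact t1.trans t2
      have d5 : 2^b * 2 ∣ 2^b * (2*s+1) := by rw [← hks]; rw [pow_succ] at d4; exact d4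
      have d6 : (2:ℕ) ∣ 2*s+1 := (Nat.mul_dvd_mul_iff_left hb0).mp d5
      omega
    · have d2 : (2:ℕ)^a ∣ k := hks ▸ dvd_mul_of_dvd_left (pow_dvd_pow 2 (by omega)) _
      have heq : j = k + 2^b := by
        have d1 : (2:ℕ)^a ∣ j := hju ▸ dvd_mul_right _ _
        have d3 : (2:ℕ)^a ∣ 2^b := pow_dvd_pow 2 (by omega)
        have d4 : 2^a ∣ j - (k + 2^b) := Nat.dvd_sub d1 (Nat.dvd_add d2 d3)
        rcases Nat.eq_zero_or_pos (j - (k + 2^b)) with h0 | hp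
        · omega
        · have := Nat.le_of_dvd hp d4; omega
      have d1 : (2:ℕ)^(a+1) ∣ j - 2^a := by rw [hj2a]; exact dvd_mul_right _ u
      have d2' : (2:ℕ)^(a+1) ∣ k := hks ▸ dvd_mul_of_dvd_left (pow_dvd_pow 2 (by omega)) _
      have d3 : (2:ℕ)^(a+1) ∣ 2^b := pow_dvd_pow 2 (by omega)
      have d5 : 2^(a+1) ∣ (k + 2^b) - (j - 2^a) := Nat.dvd_sub (Nat.dvd_add d2' d3) d1
      have he : (k + 2^b) - (j - 2^a) = 2^a := by omega
      rw [he] at d5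
      have t1 := Nat.le_of_dvd ha0 d5
      have t2 : (2:ℕ)^a < 2^(a+1) := Nat.pow_lt_pow_succ (by omega)
      omega
  · rintro ⟨g1, g2⟩
    refine ⟨?_, by omega⟩
    by_contra hcon
    simp only [not_le] at hcon
    have hklt : k < j := by omega
    rcases le_total a b with h | h
    · have d1 : (2:ℕ)^a ∣ j := hju ▸ dvd_mul_right _ _
      have d2 : (2:ℕ)^a ∣ k := hks ▸ dvd_mul_of_dvd_left (pow_dvd_pow 2 h) _
      have hle := Nat.le_of_dvd (show 0 < j - k by omega) (Nat.dvd_sub d1 d2)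
      omega
    · have d1 : (2:ℕ)^b ∣ j := hju ▸ dvd_mul_of_dvd_left (pow_dvd_pow 2 h) _
      have d2 : (2:ℕ)^b ∣ k := hks ▸ dvd_mul_right _ _
      have hle := Nat.le_of_dvd (show 0 < j - k by omega) (Nat.dvd_sub d1 d2)
      omega

-- ---- effect of the two BIT loops ----

theorem pvUpdLoop_length (fuel : Nat) (bit : List Int) (t : Int) :
    (pvUpdLoop fuel bit t).length = bit.length := by
  induction fuel generalizing bit t with
  | zero => rfl
  | succ f ih =>
      unfold pvUpdLoop
      split
      · rw [ih]; simp [PySem.List.length_pySetD]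
      · rfl

theorem pvUpdLoop_getD (fuel : Nat) (bit : List Int) (k : ℕ) (hk : 0 < k)
    (hfuel : bit.length ≤ k + fuel) (j : ℕ) :
    (pvUpdLoop fuel bit (k : Int)).getD j 0 =
      bit.getD j 0 + (if k ≤ j ∧ j < bit.length ∧ j - lowN j < k then 1 else 0) := by
  induction fuel generalizing bit k with
  | zero =>
      unfold pvUpdLoop
      rw [if_neg (by omega)]
      omega
  | succ f ih =>
      unfold pvUpdLoop
      by_cases hlt : (k : Int) < PySem.List.len bit
      · rw [if_pos hlt]
        have hklen : k < bit.length := by simp [PySem.List.len_eq] at hlt; omega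
        have hlow := lowN_pos k hk
        have hcast : (k : Int) + pvLow (k : Int) = ((k + lowN k : ℕ) : Int) := by
          unfold pvLow
          rw [pvLow_natCast' k hk]
          push_cast
          ring
        have hbit' : PySem.List.pySetD bit (k:Int) (PySem.List.pyGetD bit (k:Int) 0 + 1)
            = bit.set k (bit.getD k 0 + 1) := by
          simp
        rw [hbit', hcast, ih _ _ (by omega) (by simp; omega)]
        have hlen : (bit.set k (bit.getD k 0 + 1)).length = bit.length := by simp
        rw [hlen]
        have hgetset : ∀ (m : ℕ), (bit.set k (bit.getD k 0 + 1)).getD m 0 =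
            if m = k then bit.getD k 0 + 1 else bit.getD m 0 := by
          intro m
          by_cases hmk : m = k
          · subst hmk
            simp [List.getD, hklen]
          · have hne : ¬ (k = m) := fun h => hmk h.symm
            simp [List.getD, hne, hmk]
        rw [hgetset j]
        by_cases hjk : j = k
        · subst hjk
          rw [if_pos rfl, if_neg (by intro h; omega), if_pos ⟨le_refl _, hklen, by omega⟩]
          omega
        · rw [if_neg hjk]
          have hiff := chain_step k j hk hjk
          by_cases hc : k ≤ j ∧ j < bit.length ∧ j - lowN j < k
          · rw [if_pos ⟨(hiff.mpr ⟨hc.1, hc.2.2⟩).1, hc.2.1, (hiff.mpr ⟨hc.1, hc.2.2⟩).2⟩, if_pos hc]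
          · rw [if_neg ?_, if_neg hc]
            intro ⟨w1, w2, w3⟩
            exact hc ⟨(hiff.mp ⟨w1, w3⟩).1, w2, (hiff.mp ⟨w1, w3⟩).2⟩
      · rw [if_neg hlt]
        have : bit.length ≤ k := by simp [PySem.List.len_eq] at hlt; omega
        rw [if_neg (by omega)]
        omega

-- the Fenwick invariant: bit[j] counts the inserted ranks lying in (j - lowbit j, j]
def fenGood (bit : List Int) (S : Finset ℕ) : Prop :=
  (∀ p ∈ S, 1 ≤ p ∧ p + 1 ≤ bit.length) ∧
  ∀ j : ℕ, 1 ≤ j → j + 1 ≤ bit.length →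
    bit.getD j 0 = ((S.filter (fun p => j - lowN j < p ∧ p ≤ j)).card : ℤ)

theorem fenGood_empty (m : ℕ) : fenGood (List.replicate (m+1) 0) (∅ : Finset ℕ) := by
  constructor
  · intro p hp; simp at hp
  · intro j h1 h2
    simp

theorem update_good (bit : List Int) (S : Finset ℕ) (k : ℕ)
    (h : fenGood bit S) (hk1 : 1 ≤ k) (hk2 : k + 1 ≤ bit.length) (hnew : k ∉ S) :
    fenGood (pvUpdLoop bit.length bit (k : Int)) (insert k S) := by
  obtain ⟨hS, hbit⟩ := h
  constructor
  · intro p hp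
    rw [pvUpdLoop_length]
    rcases Finset.mem_insert.mp hp with rfl | hp'
    · omega
    · exact hS p hp'
  · intro j h1 h2
    rw [pvUpdLoop_length] at h2
    rw [pvUpdLoop_getD _ _ _ (by omega) (by omega) j, hbit j h1 h2,
        Finset.filter_insert]
    by_cases hc : j - lowN j < k ∧ k ≤ j
    · rw [if_pos hc, Finset.card_insert_of_notMem (fun hmem => hnew (Finset.mem_filter.mp hmem).1),
          if_pos ⟨hc.2, by omega, hc.1⟩]
      push_cast
      ring
    · rw [if_neg hc, if_neg (by intro ⟨w1, w2, w3⟩; exact hc ⟨w3, w1⟩)]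
      ring

theorem qry_eq (fuel : ℕ) (bit : List Int) (k : ℕ) (acc : Int) (S : Finset ℕ)
    (h : fenGood bit S) (hfuel : k ≤ fuel) (hlen : k + 1 ≤ bit.length) :
    pvQryLoop fuel bit (k : Int) acc = acc + ((S.filter (fun p => p ≤ k)).card : ℤ) := by
  induction fuel generalizing k acc with
  | zero =>
      have hk0 : k = 0 := by omega
      subst hk0
      unfold pvQryLoop
      have : S.filter (fun p => p ≤ 0) = ∅ := by
        apply Finset.filter_eq_empty_iff.mpr
        intro p hp
        have := h.1 p hp
        omega
      rw [this]
      simp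
  | succ f ih =>
      rcases Nat.eq_zero_or_pos k with rfl | hkpos
      · unfold pvQryLoop
        rw [if_neg (by omega)]
        have : S.filter (fun p => p ≤ 0) = ∅ := by
          apply Finset.filter_eq_empty_iff.mpr
          intro p hp
          have := h.1 p hp
          omega
        rw [this]
        simp
      · unfold pvQryLoop
        rw [if_pos (by exact_mod_cast Nat.cast_pos.mpr hkpos)]
        have hlow := lowN_pos k hkpos
        have hlle := lowN_le k
        have hcast : (k : Int) - pvLow (k : Int) = ((k - lowN k : ℕ) : Int) := by
          unfold pvLow
          rw [pvLow_natCast' k hkpos]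
          omega
        have hget : PySem.List.pyGetD bit (k : Int) 0 = bit.getD k 0 := by simp
        rw [hcast, hget, ih (k - lowN k) _ (by omega) (by omega),
            h.2 k (by omega) hlen]
        have hsplit : (S.filter (fun p => p ≤ k)).card
            = (S.filter (fun p => p ≤ k - lowN k)).card
              + (S.filter (fun p => k - lowN k < p ∧ p ≤ k)).card := by
          have e1 : S.filter (fun p => p ≤ k - lowN k)
              = (S.filter (fun p => p ≤ k)).filter (fun p => p ≤ k - lowN k) := by
            rw [Finset.filter_filter]
            apply Finset.filter_congr
            intro p _
            constructor
            · intro hp; exact ⟨by omega, hp⟩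
            · intro hp; exact hp.2
          have e2 : S.filter (fun p => k - lowN k < p ∧ p ≤ k)
              = (S.filter (fun p => p ≤ k)).filter (fun p => ¬ p ≤ k - lowN k) := by
            rw [Finset.filter_filter]
            apply Finset.filter_congr
            intro p _
            constructor
            · intro hp; exact ⟨hp.2, by omega⟩
            · intro hp; exact ⟨by omega, hp.1⟩
          rw [e1, e2, Finset.card_filter_add_card_filter_not]
        push_cast [hsplit]
        ring

-- ---- sorted unique values, ranks, and the treeid dictionary ----

theorem suv_sorted (l : List Int) : (pvSuv l).Pairwise (· < ·) := PySem.List.sorted_ofList_pairwise_lt l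

theorem suv_mem (l : List Int) (x : Int) : x ∈ pvSuv l ↔ x ∈ l := by
  unfold pvSuv; rw [PySem.List.mem_sorted, PySem.Set.mem_ofList]

theorem suv_nodup (l : List Int) : (pvSuv l).Nodup := (suv_sorted l).imp (fun h => ne_of_lt h)

theorem suv_getElem_lt (l : List Int) (i j : ℕ) (hj : j < (pvSuv l).length) (hij : i < j) :
    (pvSuv l)[i]'(by omega) < (pvSuv l)[j] :=
  List.pairwise_iff_getElem.mp (suv_sorted l) i j (by omega) hj hij

theorem idxOf_inj' (xs : List Int) (u v : Int) (h1 : u ∈ xs) (h2 : v ∈ xs)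
    (h : xs.idxOf u = xs.idxOf v) : u = v := by
  have hul := List.idxOf_lt_length_of_mem h1
  have hvl := List.idxOf_lt_length_of_mem h2
  have key : xs[xs.idxOf u]'hul = xs[xs.idxOf v]'hvl := by congr 1
  rw [List.getElem_idxOf hul, List.getElem_idxOf hvl] at key
  exact key

theorem suv_lt_iff (l : List Int) (u v : Int) (hu : u ∈ pvSuv l) (hv : v ∈ pvSuv l) :
    u < v ↔ (pvSuv l).idxOf u < (pvSuv l).idxOf v := by
  have hul := List.idxOf_lt_length_of_mem hu
  have hvl := List.idxOf_lt_length_of_mem hv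
  have hgu : (pvSuv l)[(pvSuv l).idxOf u] = u := List.getElem_idxOf hul
  have hgv : (pvSuv l)[(pvSuv l).idxOf v] = v := List.getElem_idxOf hvl
  constructor
  · intro hlt
    by_contra hcon
    rcases Nat.lt_or_ge ((pvSuv l).idxOf v) ((pvSuv l).idxOf u) with h | h
    · have := suv_getElem_lt l _ _ hul h
      rw [hgu, hgv] at this
      omega
    · have heq : (pvSuv l).idxOf u = (pvSuv l).idxOf v := by omega
      have := idxOf_inj' _ _ _ hu hv heq
      omega
  · intro hlt
    have := suv_getElem_lt l _ _ hvl hlt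
    rw [hgu, hgv] at this
    exact this

theorem suv_le_iff (l : List Int) (u v : Int) (hu : u ∈ pvSuv l) (hv : v ∈ pvSuv l) :
    u ≤ v ↔ (pvSuv l).idxOf u ≤ (pvSuv l).idxOf v := by
  rw [← not_lt, suv_lt_iff l v u hv hu]
  omega

theorem foldl_enum_getD_not_mem (xs : List Int) (s : Int) (d : PySem.Dict Int Int)
    (v : Int) (hv : v ∉ xs) :
    ((PySem.List.enumerate xs s).foldl (fun d p => d.insert p.2 (p.1 + 1)) d).getD v 0
      = d.getD v 0 := by
  induction xs generalizing s d with
  | nil => simp [PySem.List.enumerate_nil]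
  | cons x t ih =>
      rw [PySem.List.enumerate_cons]
      simp only [List.foldl_cons]
      rw [ih _ _ (by simp at hv; exact hv.2)]
      exact PySem.Dict.getD_insert_of_ne _ _ _ (by simp at hv; exact fun h => hv.1 h)

theorem foldl_enum_getD (xs : List Int) (hnd : xs.Nodup) (s : Int) (d : PySem.Dict Int Int)
    (v : Int) (hv : v ∈ xs) :
    ((PySem.List.enumerate xs s).foldl (fun d p => d.insert p.2 (p.1 + 1)) d).getD v 0
      = s + (xs.idxOf v : Int) + 1 := by
  induction xs generalizing s d with
  | nil => simp at hv
  | cons x t ih =>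
      rw [PySem.List.enumerate_cons]
      simp only [List.foldl_cons]
      by_cases hvx : v = x
      · subst hvx
        rw [foldl_enum_getD_not_mem t (s+1) _ v (by simp at hnd; exact hnd.1)]
        rw [PySem.Dict.getD_insert_self]
        simp [List.idxOf_cons_self]
      · rw [ih (by simp at hnd; exact hnd.2) (s+1) _ (by simp at hv; tauto)]
        rw [List.idxOf_cons_ne _ (fun h => hvx h.symm)]
        push_cast
        ring

theorem pvV2_getD (l : List Int) (v : Int) (hv : v ∈ pvSuv l) :
    (pvV2 l).getD v 0 = ((pvSuv l).idxOf v : Int) + 1 := by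
  unfold pvV2
  rw [foldl_enum_getD _ (suv_nodup l) _ _ _ hv]
  ring

-- rank of a value = its BIT index; rank sets of value sets
def rkOf (l : List Int) (v : Int) : ℕ := (pvSuv l).idxOf v + 1
def rkS (l : List Int) (V : Finset ℤ) : Finset ℕ := V.image (rkOf l)

theorem rkS_card_filter (l : List Int) (V : Finset ℤ) (hV : ∀ x ∈ V, x ∈ pvSuv l)
    (q : ℕ → Prop) [DecidablePred q] :
    ((rkS l V).filter q).card = (V.filter (fun x => q (rkOf l x))).card := by
  unfold rkS
  rw [Finset.filter_image]
  apply Finset.card_image_of_injOn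
  intro x hx y hy hxy
  exact idxOf_inj' _ _ _ (hV x (Finset.mem_filter.mp hx).1) (hV y (Finset.mem_filter.mp hy).1)
    (by unfold rkOf at hxy; omega)

theorem rkOf_notmem (l : List Int) (V : Finset ℤ) (hV : ∀ x ∈ V, x ∈ pvSuv l)
    (v : Int) (hv : v ∈ pvSuv l) (hnv : v ∉ V) : rkOf l v ∉ rkS l V := by
  intro hmem
  obtain ⟨x, hx, hxv⟩ := Finset.mem_image.mp hmem
  have : x = v := idxOf_inj' _ _ _ (hV x hx) hv (by unfold rkOf at hxv; omega)
  exact hnv (this ▸ hx)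

-- ---- specification values (what both passes compute, as distinct counts) ----

def srSpecN (l : List Int) (k : ℕ) : ℤ :=
  (((l.drop (k+1)).toFinset.filter (fun x => x < l.getD k 0)).card : ℤ)
def llSpecN (l : List Int) (k : ℕ) : ℤ :=
  (((l.take k).toFinset.filter (fun x => l.getD k 0 < x)).card : ℤ)

-- len(set(xs)) as a Finset cardinality
theorem setLen_toFinset (xs : List Int) : (PySem.Set.ofList xs).length = xs.toFinset.card := by
  have h1 : (PySem.Set.ofList xs).toFinset = xs.toFinset := by
    apply Finset.ext
    intro a
    simp [PySem.Set.mem_ofList]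
  rw [← h1, List.toFinset_card_of_nodup (PySem.Set.nodup_ofList xs)]

-- visited/bit step shared by both passes: conditionally update and insert v
theorem visit_good (l : List Int) (bit : List Int) (vis : PySem.Set Int) (V : Finset ℤ)
    (v : Int) (hv : v ∈ pvSuv l)
    (hlen : bit.length = (pvSuv l).length + 1)
    (hmemV : ∀ x ∈ V, x ∈ pvSuv l)
    (hvisV : ∀ x, x ∈ vis ↔ x ∈ V)
    (hg : fenGood bit (rkS l V)) :
    fenGood (if !(PySem.Set.contains vis v) then pvUpdate (pvV2 l) bit v else bit)
        (rkS l (insert v V))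
    ∧ (if !(PySem.Set.contains vis v) then pvUpdate (pvV2 l) bit v else bit).length
        = bit.length := by
  by_cases hc : PySem.Set.contains vis v
  · have hvV : v ∈ V := (hvisV v).mp ((PySem.Set.contains_iff vis v).mp hc)
    rw [Finset.insert_eq_self.mpr hvV]
    simp only [hc, Bool.not_true, Bool.false_eq_true, if_false]
    exact ⟨hg, trivial⟩
  · have hb : PySem.Set.contains vis v = false := by
      cases hcc : PySem.Set.contains vis v
      · rfl
      · exact absurd hcc hc
    have hnv : v ∉ V := fun hm => hc ((PySem.Set.contains_iff vis v).mpr ((hvisV v).mpr hm))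
    simp only [hb, Bool.not_false, if_true]
    have hwl := List.idxOf_lt_length_of_mem hv
    have hcast : (pvV2 l).getD v 0 = ((rkOf l v : ℕ) : Int) := by
      rw [pvV2_getD l v hv]
      unfold rkOf
      push_cast
      ring
    unfold pvUpdate
    rw [hcast]
    constructor
    · have hgu := update_good bit (rkS l V) (rkOf l v) hg (by unfold rkOf; omega)
        (by unfold rkOf; omega) (rkOf_notmem l V hmemV v hv hnv)
      have himg : rkS l (insert v V) = insert (rkOf l v) (rkS l V) := Finset.image_insert _ _ _
      rw [himg]
      exact hgu
    · exact pvUpdLoop_length _ _ _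

-- a query at w returns the number of distinct inserted values ≤ w
theorem query_count (l : List Int) (bit : List Int) (V : Finset ℤ) (w : Int) (hw : w ∈ pvSuv l)
    (hlen : bit.length = (pvSuv l).length + 1)
    (hmemV : ∀ x ∈ V, x ∈ pvSuv l)
    (hg : fenGood bit (rkS l V)) :
    pvQuery (pvV2 l) bit w = ((V.filter (fun x => x ≤ w)).card : ℤ) := by
  unfold pvQuery
  have hwl := List.idxOf_lt_length_of_mem hw
  have hcast : (pvV2 l).getD w 0 = ((rkOf l w : ℕ) : Int) := by
    rw [pvV2_getD l w hw]
    unfold rkOf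
    push_cast
    ring
  rw [hcast]
  have htn : (((rkOf l w : ℕ) : Int)).toNat = rkOf l w := by omega
  rw [htn, qry_eq (rkOf l w) bit (rkOf l w) 0 (rkS l V) hg (le_refl _) (by unfold rkOf; omega)]
  rw [rkS_card_filter l V hmemV (fun p => p ≤ rkOf l w)]
  have : V.filter (fun x => rkOf l x ≤ rkOf l w) = V.filter (fun x => x ≤ w) := by
    apply Finset.filter_congr
    intro x hx
    have hxm : x ∈ pvSuv l := hmemV x hx
    have := suv_le_iff l x w hxm hw
    unfold rkOf
    constructor
    · intro h; exact this.mpr (by omega)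
    · intro h; have := this.mp h; omega
  rw [this]
  ring

-- ---- generic list helpers ----

theorem getD_set' (xs : List Int) (n : ℕ) (a : Int) (hn : n < xs.length) (k : ℕ) :
    (xs.set n a).getD k 0 = if k = n then a else xs.getD k 0 := by
  by_cases hk : k = n
  · subst hk
    simp [List.getD, hn]
  · have hne : ¬ (n = k) := fun h => hk h.symm
    simp [List.getD, hne, hk]

theorem drop_toFinset_succ (l : List Int) (i : ℕ) (hi : i < l.length) :
    (l.drop i).toFinset = insert (l.getD i 0) (l.drop (i+1)).toFinset := by
  apply Finset.ext
  intro a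
  rw [List.mem_toFinset, List.drop_eq_getElem_cons hi, List.mem_cons,
      List.getD_eq_getElem l 0 hi]
  simp

theorem take_toFinset_succ (l : List Int) (i : ℕ) (hi : i < l.length) :
    (l.take (i+1)).toFinset = insert (l.getD i 0) (l.take i).toFinset := by
  apply Finset.ext
  intro a
  rw [List.mem_toFinset, List.take_add_one, List.mem_append,
      List.getD_eq_getElem l 0 hi]
  simp [List.getElem?_eq_getElem hi]
  tauto

theorem suv_min_le (l : List Int) (x : Int) (hx : x ∈ l) (h0 : 0 < (pvSuv l).length) :
    (pvSuv l)[0] ≤ x := by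
  have hxs : x ∈ pvSuv l := (suv_mem l x).mpr hx
  have hxl := List.idxOf_lt_length_of_mem hxs
  have hg : (pvSuv l)[(pvSuv l).idxOf x] = x := List.getElem_idxOf hxl
  rcases Nat.eq_zero_or_pos ((pvSuv l).idxOf x) with h | h
  · have he : (pvSuv l)[(pvSuv l).idxOf x]'hxl = (pvSuv l)[0]'h0 := by congr 1
    rw [hg] at he
    omega
  · have := suv_getElem_lt l 0 _ hxl h
    rw [hg] at this
    omega

theorem suv_le_max (l : List Int) (x : Int) (hx : x ∈ l) (hne : pvSuv l ≠ []) :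
    x ≤ (pvSuv l).getLast hne := by
  have hxs : x ∈ pvSuv l := (suv_mem l x).mpr hx
  have hxl := List.idxOf_lt_length_of_mem hxs
  have hg : (pvSuv l)[(pvSuv l).idxOf x] = x := List.getElem_idxOf hxl
  rw [List.getLast_eq_getElem hne]
  rcases Nat.lt_or_ge ((pvSuv l).idxOf x) ((pvSuv l).length - 1) with h | h
  · have hlt := suv_getElem_lt l _ ((pvSuv l).length - 1) (by omega) h
    rw [hg] at hlt
    exact le_of_lt hlt
  · have he : (pvSuv l)[(pvSuv l).idxOf x]'hxl
        = (pvSuv l)[(pvSuv l).length - 1]'(by omega) := by congr 1; omega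
    rw [hg] at he
    omega

-- ---- the smaller_right pass ----

def SmallInv (l : List Int) (i : ℕ) (st : List Int × PySem.Set Int × List Int) : Prop :=
  st.1.length = (pvSuv l).length + 1 ∧
  (∀ x : Int, x ∈ st.2.1 ↔ x ∈ l.drop i) ∧
  fenGood st.1 (rkS l (l.drop i).toFinset) ∧
  st.2.2.length = l.length ∧
  (∀ k : ℕ, k < l.length → st.2.2.getD k 0 = if i ≤ k then srSpecN l k else 0)

theorem small_step (l : List Int) (i : ℕ) (hi : i < l.length)
    (st : List Int × PySem.Set Int × List Int) (h : SmallInv l (i+1) st) :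
    SmallInv l i (pvSmallStep l st (i : Int)) := by
  obtain ⟨bit, vis, sr⟩ := st
  obtain ⟨hlen, hvis, hg, hsrlen, hsr⟩ := h
  simp only at hlen hvis hg hsrlen hsr
  have hv_eq : PySem.List.pyGetD l (i : Int) 0 = l.getD i 0 := by simp
  have hvl : l.getD i 0 ∈ l := by
    rw [List.getD_eq_getElem l 0 hi]; exact List.getElem_mem hi
  have hvsuv : l.getD i 0 ∈ pvSuv l := (suv_mem l _).mpr hvl
  have hmemV : ∀ x ∈ (l.drop (i+1)).toFinset, x ∈ pvSuv l := by
    intro x hx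
    exact (suv_mem l x).mpr (List.mem_of_mem_drop (List.mem_toFinset.mp hx))
  have hmemV' : ∀ x ∈ (l.drop i).toFinset, x ∈ pvSuv l := by
    intro x hx
    exact (suv_mem l x).mpr (List.mem_of_mem_drop (List.mem_toFinset.mp hx))
  have hdropset : (l.drop i).toFinset = insert (l.getD i 0) (l.drop (i+1)).toFinset :=
    drop_toFinset_succ l i hi
  have hVG := visit_good l bit vis (l.drop (i+1)).toFinset (l.getD i 0) hvsuv hlen hmemV
      (by intro x; rw [hvis x]; simp) hg
  have hgood' : fenGood
      (if !(PySem.Set.contains vis (l.getD i 0)) then pvUpdate (pvV2 l) bit (l.getD i 0) else bit)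
      (rkS l (l.drop i).toFinset) := by
    rw [hdropset]
    exact hVG.1
  simp only [pvSmallStep]
  refine ⟨?_, ?_, ?_, ?_, ?_⟩ <;> dsimp only
  · rw [hv_eq, hVG.2, hlen]
  · intro x
    rw [hv_eq, PySem.Set.mem_add, hvis x, List.drop_eq_getElem_cons hi, List.mem_cons,
        ← List.getD_eq_getElem l 0 hi]
    tauto
  · rw [hv_eq]
    exact hgood'
  · split
    · rw [PySem.List.length_pySetD, hsrlen]
    · exact hsrlen
  · intro k hk
    have h0len : 0 < (pvSuv l).length := List.length_pos_of_mem hvsuv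
    have hsuv0 : PySem.List.pyGetD (pvSuv l) 0 0 = (pvSuv l)[0] := by
      rw [PySem.List.pyGetD_zero, List.getD_eq_getElem _ 0 h0len]
    by_cases hguard : PySem.List.pyGetD l (i:Int) 0 ≠ PySem.List.pyGetD (pvSuv l) 0 0
    · -- the queried value is the predecessor of v in suv
      have hvne : l.getD i 0 ≠ (pvSuv l)[0] := by rw [← hsuv0, ← hv_eq]; exact hguard
      have hvidx := List.idxOf_lt_length_of_mem hvsuv
      have hidx1 : 1 ≤ (pvSuv l).idxOf (l.getD i 0) := by
        rcases Nat.eq_zero_or_pos ((pvSuv l).idxOf (l.getD i 0)) with h0 | h0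
        · exfalso
          have he : (pvSuv l)[(pvSuv l).idxOf (l.getD i 0)]'hvidx
              = (pvSuv l)[0]'h0len := by congr 1
          rw [List.getElem_idxOf hvidx] at he
          exact hvne he
        · omega
      have hv2idx : (pvV2 l).getD (l.getD i 0) 0 - 1 - 1
          = ((((pvSuv l).idxOf (l.getD i 0) - 1 : ℕ)) : Int) := by
        rw [pvV2_getD l _ hvsuv]
        omega
      have hwlt : (pvSuv l).idxOf (l.getD i 0) - 1 < (pvSuv l).length := by omega
      have hw_eq : PySem.List.pyGetD (pvSuv l) ((pvV2 l).getD (l.getD i 0) 0 - 1 - 1) 0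
          = (pvSuv l)[(pvSuv l).idxOf (l.getD i 0) - 1] := by
        rw [hv2idx]
        simp only [PySem.List.pyGetD_natCast]
        exact List.getD_eq_getElem _ 0 hwlt
      have hwmem : (pvSuv l)[(pvSuv l).idxOf (l.getD i 0) - 1] ∈ pvSuv l := List.getElem_mem hwlt
      have hwidx : (pvSuv l).idxOf ((pvSuv l)[(pvSuv l).idxOf (l.getD i 0) - 1])
          = (pvSuv l).idxOf (l.getD i 0) - 1 := List.Nodup.idxOf_getElem (suv_nodup l) _ _
      have hquery := query_count l
        (if !(PySem.Set.contains vis (l.getD i 0)) then pvUpdate (pvV2 l) bit (l.getD i 0) else bit)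
        ((l.drop i).toFinset) ((pvSuv l)[(pvSuv l).idxOf (l.getD i 0) - 1]) hwmem
        (by rw [hVG.2, hlen]) hmemV' hgood'
      have hfeq : ((l.drop i).toFinset.filter
            (fun x => x ≤ (pvSuv l)[(pvSuv l).idxOf (l.getD i 0) - 1])).card
          = ((l.drop (i+1)).toFinset.filter (fun x => x < l.getD i 0)).card := by
        have e1 : (l.drop i).toFinset.filter
              (fun x => x ≤ (pvSuv l)[(pvSuv l).idxOf (l.getD i 0) - 1])
            = (l.drop i).toFinset.filter (fun x => x < l.getD i 0) := by
          apply Finset.filter_congr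
          intro x hx
          have hxs := hmemV' x hx
          rw [suv_le_iff l x _ hxs hwmem, hwidx, suv_lt_iff l x _ hxs hvsuv]
          omega
        rw [e1, hdropset, Finset.filter_insert, if_neg (lt_irrefl _)]
      rw [if_pos hguard, hv_eq, PySem.List.pySetD_natCast, getD_set' sr i _ (by omega) k]
      by_cases hki : k = i
      · subst hki
        rw [if_pos rfl, if_pos (le_refl _)]
        rw [hw_eq, hquery, hfeq]
        rfl
      · rw [if_neg hki, hsr k hk]
        by_cases hik : i ≤ k
        · rw [if_pos (by omega), if_pos hik]
        · rw [if_neg (by omega), if_neg hik]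
    · -- v is the minimum: the entry stays 0, and the spec count is 0 too
      rw [if_neg hguard]
      simp only [ne_eq, Decidable.not_not] at hguard
      rw [hsr k hk]
      by_cases hki : k = i
      · subst hki
        rw [if_neg (by omega), if_pos (le_refl _)]
        unfold srSpecN
        have : (l.drop (k+1)).toFinset.filter (fun x => x < l.getD k 0) = ∅ := by
          apply Finset.filter_eq_empty_iff.mpr
          intro x hx
          have hxl : x ∈ l := List.mem_of_mem_drop (List.mem_toFinset.mp hx)
          have := suv_min_le l x hxl h0len
          rw [← hv_eq, hguard, hsuv0]
          omega
        rw [this]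
        simp
      · by_cases hik : i ≤ k
        · rw [if_pos (by omega), if_pos hik]
        · rw [if_neg (by omega), if_neg hik]

theorem small_fold (l : List Int) (i : ℕ) (hi : i ≤ l.length)
    (st : List Int × PySem.Set Int × List Int) (h : SmallInv l i st) :
    SmallInv l 0 (((PySem.List.pyRange 0 (i : Int) 1).reverse).foldl (pvSmallStep l) st) := by
  induction i generalizing st with
  | zero =>
      rw [PySem.List.pyRange_one_eq_nil (by omega)]
      simpa using h
  | succ i ih =>
      have hcast : ((i+1 : ℕ) : Int) = (i : Int) + 1 := by push_cast; ring
      rw [hcast, PySem.List.pyRange_one_succ_right (by positivity), List.reverse_append]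
      simp only [List.reverse_cons, List.reverse_nil, List.nil_append, List.singleton_append,
        List.foldl_cons]
      exact ih (by omega) _ (small_step l i (by omega) st h)

theorem small_init (l : List Int) :
    SmallInv l l.length
      (List.replicate ((pvSuv l).length + 1) 0, PySem.Set.empty, List.replicate l.length 0) := by
  refine ⟨by simp, ?_, ?_, by simp, ?_⟩
  · intro x
    simp [List.drop_length, PySem.Set.empty]
  · have : (l.drop l.length).toFinset = (∅ : Finset ℤ) := by simp [List.drop_length]
    show fenGood _ _
    rw [this]
    unfold rkS
    rw [Finset.image_empty]
    exact fenGood_empty _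
  · intro k hk
    rw [if_neg (by omega)]
    simp [List.getD]

theorem srA_eq (l : List Int) :
    (((PySem.List.pyRange 0 (PySem.List.len l) 1).reverse).foldl (pvSmallStep l)
      (List.replicate ((pvSuv l).length + 1) 0, PySem.Set.empty, List.replicate l.length 0)).2.2
    = (List.range l.length).map (fun k => srSpecN l k) := by
  have hfin := small_fold l l.length (le_refl _) _ (small_init l)
  rw [PySem.List.len_eq]
  obtain ⟨-, -, -, hlen, hval⟩ := hfin
  apply List.ext_getElem
  · rw [hlen]; simp
  · intro k h1 h2
    have hk : k < l.length := by rw [hlen] at h1; exact h1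
    have := hval k hk
    rw [if_pos (by omega)] at this
    rw [← List.getD_eq_getElem _ 0 h1, this]
    simp [List.getElem_map, List.getElem_range]

-- ---- the larger_left pass ----

def LargeInv (l : List Int) (i : ℕ) (st : List Int × PySem.Set Int × List Int) : Prop :=
  st.1.length = (pvSuv l).length + 1 ∧
  (∀ x : Int, x ∈ st.2.1 ↔ x ∈ l.take i) ∧
  fenGood st.1 (rkS l (l.take i).toFinset) ∧
  st.2.2.length = l.length ∧
  (∀ k : ℕ, k < l.length → st.2.2.getD k 0 = if k < i then llSpecN l k else 0)

theorem large_step (l : List Int) (i : ℕ) (hi : i < l.length)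
    (st : List Int × PySem.Set Int × List Int) (h : LargeInv l i st) (y : Int) :
    LargeInv l (i+1) (pvLargeStep l st ((i : Int), y)) := by
  obtain ⟨bit, vis, sr⟩ := st
  obtain ⟨hlen, hvis, hg, hsrlen, hsr⟩ := h
  simp only at hlen hvis hg hsrlen hsr
  have hv_eq : PySem.List.pyGetD l (i : Int) 0 = l.getD i 0 := by simp
  have hvl : l.getD i 0 ∈ l := by
    rw [List.getD_eq_getElem l 0 hi]; exact List.getElem_mem hi
  have hvsuv : l.getD i 0 ∈ pvSuv l := (suv_mem l _).mpr hvl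
  have hne : pvSuv l ≠ [] := List.ne_nil_of_mem hvsuv
  have h0len : 0 < (pvSuv l).length := List.length_pos_of_mem hvsuv
  have hmemV : ∀ x ∈ (l.take i).toFinset, x ∈ pvSuv l := by
    intro x hx
    exact (suv_mem l x).mpr (List.mem_of_mem_take (List.mem_toFinset.mp hx))
  have hmemV' : ∀ x ∈ (l.take (i+1)).toFinset, x ∈ pvSuv l := by
    intro x hx
    exact (suv_mem l x).mpr (List.mem_of_mem_take (List.mem_toFinset.mp hx))
  have htakeset : (l.take (i+1)).toFinset = insert (l.getD i 0) (l.take i).toFinset :=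
    take_toFinset_succ l i hi
  have hVG := visit_good l bit vis (l.take i).toFinset (l.getD i 0) hvsuv hlen hmemV
      (by intro x; rw [hvis x]; simp) hg
  have hgood' : fenGood
      (if !(PySem.Set.contains vis (l.getD i 0)) then pvUpdate (pvV2 l) bit (l.getD i 0) else bit)
      (rkS l (l.take (i+1)).toFinset) := by
    rw [htakeset]
    exact hVG.1
  have hlast_eq : PySem.List.pyGetD (pvSuv l) (-1) 0 = (pvSuv l).getLast hne :=
    PySem.List.pyGetD_neg_one (xs := pvSuv l) 0 hne
  simp only [pvLargeStep]
  refine ⟨?_, ?_, ?_, ?_, ?_⟩ <;> dsimp only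
  · rw [hv_eq, hVG.2, hlen]
  · intro x
    rw [hv_eq, PySem.Set.mem_add, hvis x, List.take_add_one, List.mem_append]
    simp [List.getElem?_eq_getElem hi]
  · rw [hv_eq]
    exact hgood'
  · split
    · rw [PySem.List.length_pySetD, hsrlen]
    · exact hsrlen
  · intro k hk
    by_cases hguard : PySem.List.pyGetD l (i:Int) 0 ≠ PySem.List.pyGetD (pvSuv l) (-1) 0
    · have hlastmem : (pvSuv l).getLast hne ∈ pvSuv l := List.getLast_mem hne
      have hquery1 := query_count l
        (if !(PySem.Set.contains vis (l.getD i 0)) then pvUpdate (pvV2 l) bit (l.getD i 0) else bit)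
        ((l.take (i+1)).toFinset) ((pvSuv l).getLast hne) hlastmem
        (by rw [hVG.2, hlen]) hmemV' hgood'
      have hfull : (l.take (i+1)).toFinset.filter (fun x => x ≤ (pvSuv l).getLast hne)
          = (l.take (i+1)).toFinset := by
        apply Finset.filter_true_of_mem
        intro x hx
        exact suv_le_max l x (List.mem_of_mem_take (List.mem_toFinset.mp hx)) hne
      have hv2idx : (pvV2 l).getD (l.getD i 0) 0 - 1
          = (((pvSuv l).idxOf (l.getD i 0) : ℕ) : Int) := by
        rw [pvV2_getD l _ hvsuv]
        ring
      have hvidx := List.idxOf_lt_length_of_mem hvsuv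
      have hw_eq : PySem.List.pyGetD (pvSuv l) ((pvV2 l).getD (l.getD i 0) 0 - 1) 0
          = l.getD i 0 := by
        rw [hv2idx]
        simp only [PySem.List.pyGetD_natCast]
        rw [List.getD_eq_getElem _ 0 hvidx]
        exact List.getElem_idxOf hvidx
      have hquery2 := query_count l
        (if !(PySem.Set.contains vis (l.getD i 0)) then pvUpdate (pvV2 l) bit (l.getD i 0) else bit)
        ((l.take (i+1)).toFinset) (l.getD i 0) hvsuv
        (by rw [hVG.2, hlen]) hmemV' hgood'
      have hcards := Finset.card_filter_add_card_filter_not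
        (s := (l.take (i+1)).toFinset) (p := fun x => x ≤ l.getD i 0)
      have hnotle : (l.take (i+1)).toFinset.filter (fun x => ¬ x ≤ l.getD i 0)
          = (l.take i).toFinset.filter (fun x => l.getD i 0 < x) := by
        have e1 : (l.take (i+1)).toFinset.filter (fun x => ¬ x ≤ l.getD i 0)
            = (l.take (i+1)).toFinset.filter (fun x => l.getD i 0 < x) := by
          apply Finset.filter_congr
          intro x _
          omega
        rw [e1, htakeset, Finset.filter_insert, if_neg (lt_irrefl _)]
      rw [if_pos hguard, hv_eq, PySem.List.pySetD_natCast, getD_set' sr i _ (by omega) k]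
      by_cases hki : k = i
      · subst hki
        rw [if_pos rfl, if_pos (show k < k + 1 by omega)]
        rw [hlast_eq]
        rw [hquery1, hw_eq, hquery2, hfull]
        unfold llSpecN
        rw [← hnotle]
        push_cast [← hcards]
        ring
      · rw [if_neg hki, hsr k hk]
        by_cases hik : k < i
        · rw [if_pos hik, if_pos (show k < i + 1 by omega)]
        · rw [if_neg hik, if_neg (show ¬ k < i + 1 by omega)]
    · rw [if_neg hguard]
      simp only [ne_eq, Decidable.not_not] at hguard
      rw [hsr k hk]
      by_cases hki : k = i
      · subst hki
        rw [if_neg (show ¬ k < k by omega), if_pos (show k < k + 1 by omega)]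
        unfold llSpecN
        have : (l.take k).toFinset.filter (fun x => l.getD k 0 < x) = ∅ := by
          apply Finset.filter_eq_empty_iff.mpr
          intro x hx
          have hxl : x ∈ l := List.mem_of_mem_take (List.mem_toFinset.mp hx)
          have := suv_le_max l x hxl hne
          rw [← hv_eq, hguard, hlast_eq]
          omega
        rw [this]
        simp
      · by_cases hik : k < i
        · rw [if_pos hik, if_pos (show k < i + 1 by omega)]
        · rw [if_neg hik, if_neg (show ¬ k < i + 1 by omega)]

theorem large_fold (l : List Int) (i : ℕ) (hi : i ≤ l.length)
    (st : List Int × PySem.Set Int × List Int) (h : LargeInv l 0 st) :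
    LargeInv l i
      (((PySem.List.pyRange 0 (i : Int) 1).map (fun j => (j, PySem.List.pyGetD l j 0))).foldl
        (pvLargeStep l) st) := by
  induction i with
  | zero =>
      rw [PySem.List.pyRange_one_eq_nil (by omega)]
      simpa using h
  | succ i ih =>
      have hcast : ((i+1 : ℕ) : Int) = (i : Int) + 1 := by push_cast; ring
      rw [hcast, PySem.List.pyRange_one_succ_right (by positivity), List.map_append,
          List.foldl_append]
      simp only [List.map_cons, List.map_nil, List.foldl_cons, List.foldl_nil]
      exact large_step l i (by omega) _ (ih (by omega)) _

theorem large_init (l : List Int) :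
    LargeInv l 0
      (List.replicate ((pvSuv l).length + 1) 0, PySem.Set.empty, List.replicate l.length 0) := by
  refine ⟨by simp, ?_, ?_, by simp, ?_⟩
  · intro x
    simp [PySem.Set.empty]
  · have : (l.take 0).toFinset = (∅ : Finset ℤ) := by simp
    show fenGood _ _
    rw [this]
    unfold rkS
    rw [Finset.image_empty]
    exact fenGood_empty _
  · intro k hk
    rw [if_neg (by omega)]
    simp [List.getD]

theorem llA_eq (l : List Int) :
    ((PySem.List.enumerate l 0).foldl (pvLargeStep l)
      (List.replicate ((pvSuv l).length + 1) 0, PySem.Set.empty, List.replicate l.length 0)).2.2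
    = (List.range l.length).map (fun k => llSpecN l k) := by
  rw [PySem.List.enumerate_eq_map_pyRange (xs := l) 0, PySem.List.len_eq]
  have hfin := large_fold l l.length (le_refl _) _ (large_init l)
  obtain ⟨-, -, -, hlen, hval⟩ := hfin
  apply List.ext_getElem
  · rw [hlen]; simp
  · intro k h1 h2
    have hk : k < l.length := by rw [hlen] at h1; exact h1
    have := hval k hk
    rw [if_pos (by omega)] at this
    rw [← List.getD_eq_getElem _ 0 h1, this]
    simp [List.getElem_map, List.getElem_range]

-- ---- B's comprehensions compute the same distinct counts ----

theorem srB_eq (l : List Int) (i : ℕ) :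
    ((PySem.Set.ofList ((l.drop (i+1)).filter (fun x => decide (x < l.getD i 0)))).length : ℤ)
      = srSpecN l i := by
  have hfs : ((l.drop (i+1)).filter (fun x => decide (x < l.getD i 0))).toFinset
      = (l.drop (i+1)).toFinset.filter (fun x => x < l.getD i 0) := by
    rw [List.toFinset_filter]
    simp
  rw [setLen_toFinset, hfs]
  rfl

theorem llB_eq (l : List Int) (i : ℕ) :
    ((PySem.Set.ofList ((l.take i).filter (fun x => decide (l.getD i 0 < x)))).length : ℤ)
      = llSpecN l i := by
  have hfs : ((l.take i).filter (fun x => decide (l.getD i 0 < x))).toFinset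
      = (l.take i).toFinset.filter (fun x => l.getD i 0 < x) := by
    rw [List.toFinset_filter]
    simp
  rw [setLen_toFinset, hfs]
  rfl

-- ---- assembly ----

theorem find_inv2_eq (l : List Int) : find_inv2 l = find_inv2_alt l := by
  have hsrB : (List.range l.length).map
        (fun i => ((PySem.Set.ofList ((l.drop (i+1)).filter (fun x => decide (x < l.getD i 0)))).length : ℤ))
      = (List.range l.length).map (fun k => srSpecN l k) :=
    List.map_congr_left (fun i _ => srB_eq l i)
  have hllB : (List.range l.length).map
        (fun i => ((PySem.Set.ofList ((l.take i).filter (fun x => decide (l.getD i 0 < x)))).length : ℤ))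
      = (List.range l.length).map (fun k => llSpecN l k) :=
    List.map_congr_left (fun i _ => llB_eq l i)
  simp only [find_inv2, find_inv2_alt]
  rw [srA_eq l, llA_eq l, hsrB, hllB]

-- ===== VERDICT (by name: the statement is the Claim_ definition above) =====
theorem find_inv2_spec : Claim_equal_find_inv2 := by
  intro l _
  exact find_inv2_eq l
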